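-- pv_equiv track=rewrite | github.com/wakuwu/KBA | renderer/cameras/cameras.py | broadcast_params
-- ===== SOURCE A (Python) =====
-- def broadcast_params(raw_params, num_groups):
--     param_list = []
--     for params in raw_params:
--         repeat_count = num_groups // len(params) + (0 if num_groups % len(params) == 0 else 1)
--         tmp_params = sum([[i] * repeat_count for i in params], [])
--         param_list.append(tmp_params)
--     transposed_list = [list(row) for row in zip(*param_list)]
--     return transposed_list
-- ===== SOURCE B (Python) =====
-- def broadcast_params(raw_params, num_groups):
--     # Direct index arithmetic: no expanded rows, no zip/transpose.
--     rcs = [num_groups // len(r) + (0 if num_groups % len(r) == 0 else 1)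
--            for r in raw_params]
--     G = min((len(r) * rc for r, rc in zip(raw_params, rcs)), default=0)
--     return [[r[j // rc] for r, rc in zip(raw_params, rcs)]
--             for j in range(G)]
-- ===== Notes on version B (the rewrite author's own statement) =====
-- stated objective: alternative
-- what changed: B replaces A's materialize-expanded-rows-then-zip-transpose by direct index arithmetic: it computes per-row repeat counts rc_i and group count G = min(len_i*rc_i) and emits group j as [r[j // rc_i] for each row], never building the expanded rows.
import Mathlib
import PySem

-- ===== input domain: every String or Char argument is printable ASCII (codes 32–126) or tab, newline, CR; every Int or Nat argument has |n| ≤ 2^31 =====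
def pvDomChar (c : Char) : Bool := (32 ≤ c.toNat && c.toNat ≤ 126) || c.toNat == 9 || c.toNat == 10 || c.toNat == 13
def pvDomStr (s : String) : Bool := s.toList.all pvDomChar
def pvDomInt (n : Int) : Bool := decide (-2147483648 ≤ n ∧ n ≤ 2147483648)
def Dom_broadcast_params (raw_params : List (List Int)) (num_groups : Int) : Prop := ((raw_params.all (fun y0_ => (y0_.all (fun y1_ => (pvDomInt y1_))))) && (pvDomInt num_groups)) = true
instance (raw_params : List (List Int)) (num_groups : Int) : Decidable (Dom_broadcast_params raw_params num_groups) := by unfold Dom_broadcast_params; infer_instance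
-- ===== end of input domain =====

-- B replaces A's build-expanded-rows-then-zip-transpose by direct index arithmetic
-- (group j, row r ↦ r[j // rc_r]); objective: alternative decomposition, no materialized expanded rows.

-- ===== PORT A =====
-- zip(*param_list) followed by list(row): columns while every list is nonempty
def pyZipStarAux (r : List Int) (rs : List (List Int)) : List (List Int) :=
  match r with
  | [] => []
  | x :: xs =>
      if rs.all (fun l => !l.isEmpty) then
        (x :: rs.map (fun l => l.headD 0)) :: pyZipStarAux xs (rs.map List.tail)
      else []

def pyZipStar (rows : List (List Int)) : List (List Int) :=
  match rows with
  | [] => []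
  | r :: rs => pyZipStarAux r rs

def broadcast_params (raw_params : List (List Int)) (num_groups : Int) : List (List Int) :=
  let param_list := raw_params.map (fun params =>
    let repeat_count := PySem.Int.floordiv num_groups (params.length : Int) +
      (if PySem.Int.mod num_groups (params.length : Int) = 0 then 0 else 1)
    -- sum([[i] * repeat_count for i in params], [])
    (params.map (fun i => List.replicate repeat_count.toNat i)).foldl (· ++ ·) ([] : List Int))
  pyZipStar param_list

-- ===== PORT B =====
def broadcast_params_alt (raw_params : List (List Int)) (num_groups : Int) : List (List Int) :=
  let rcs := raw_params.map (fun r =>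
    PySem.Int.floordiv num_groups (r.length : Int) +
      (if PySem.Int.mod num_groups (r.length : Int) = 0 then 0 else 1))
  let G := PySem.List.minD ((raw_params.zip rcs).map (fun p => (p.1.length : Int) * p.2))
            (fun x => x) 0
  (PySem.List.pyRange 0 G 1).map (fun j =>
    (raw_params.zip rcs).map (fun p => PySem.List.pyGetD p.1 (PySem.Int.floordiv j p.2) 0))

-- ===== PRECONDITION & SPEC =====
-- Pre_ excludes inputs containing an empty row, on which Python A (and B) raise ZeroDivisionError.
def Pre_broadcast_params (raw_params : List (List Int)) (num_groups : Int) : Prop :=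
  ∀ r ∈ raw_params, r ≠ []
instance (raw_params : List (List Int)) (num_groups : Int) : Decidable (Pre_broadcast_params raw_params num_groups) := by unfold Pre_broadcast_params; infer_instance

def pvWitness_broadcast_params : List (List Int) × Int := ([[1, 2], [3, 4, 5]], 4)

def Spec_broadcast_params (raw_params : List (List Int)) (num_groups : Int) (out : List (List Int)) : Prop := out = broadcast_params_alt raw_params num_groups
instance (raw_params : List (List Int)) (num_groups : Int) (out : List (List Int)) : Decidable (Spec_broadcast_params raw_params num_groups out) := by unfold Spec_broadcast_params; infer_instance

-- ===== CLAIM (what is proved, stated in full; the proofs are below) =====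
def Claim_equal_broadcast_params : Prop := ∀ (raw_params : List (List Int)) (num_groups : Int), Dom_broadcast_params raw_params num_groups → Pre_broadcast_params raw_params num_groups → Spec_broadcast_params raw_params num_groups (broadcast_params raw_params num_groups)

-- ===== LEMMAS AND PROOFS =====

-- running minimum over Nat lists
theorem fmin_le_init (ls : List Nat) (a : Nat) : ls.foldl min a ≤ a := by
  induction ls generalizing a with
  | nil => exact le_refl a
  | cons x t ih => exact le_trans (ih (min a x)) (min_le_left a x)

theorem fmin_le_mem (ls : List Nat) (a : Nat) {x : Nat} (hx : x ∈ ls) : ls.foldl min a ≤ x := by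
  induction ls generalizing a with
  | nil => cases hx
  | cons y t ih =>
      rcases List.mem_cons.mp hx with h | h
      · subst h; exact le_trans (fmin_le_init t (min a x)) (min_le_right a x)
      · exact ih (min a y) h

theorem fmin_attained (ls : List Nat) (a : Nat) : ls.foldl min a = a ∨ ls.foldl min a ∈ ls := by
  induction ls generalizing a with
  | nil => exact Or.inl rfl
  | cons x t ih =>
      rcases ih (min a x) with h | h
      · rcases min_choice a x with hm | hm
        · exact Or.inl (by rw [List.foldl_cons, h, hm])
        · exact Or.inr (by rw [List.foldl_cons, h, hm]; exact List.mem_cons_self)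
      · exact Or.inr (List.mem_cons_of_mem x h)

theorem fmin_succ (ls : List Nat) (a : Nat) :
    (ls.map (· + 1)).foldl min (a + 1) = ls.foldl min a + 1 := by
  induction ls generalizing a with
  | nil => rfl
  | cons x t ih =>
      simp only [List.map_cons, List.foldl_cons]
      rw [show min (a + 1) (x + 1) = min a x + 1 by omega]
      exact ih (min a x)

def mLen (r : List Int) (rs : List (List Int)) : Nat := (rs.map List.length).foldl min r.length

theorem zipAux_eq (r : List Int) (rs : List (List Int)) :
    pyZipStarAux r rs =
      (List.range (mLen r rs)).map (fun j => r.getD j 0 :: rs.map (fun l => l.getD j 0)) := by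
  induction r generalizing rs with
  | nil =>
      have h0 : mLen [] rs = 0 := Nat.le_zero.mp (fmin_le_init _ _)
      rw [h0]; rfl
  | cons x xs ih =>
      by_cases hall : rs.all (fun l => !l.isEmpty) = true
      · have hne : ∀ l ∈ rs, l ≠ [] := by
          intro l hl
          have := List.all_eq_true.mp hall l hl
          simpa using this
        have key1 : mLen (x :: xs) rs = mLen xs (rs.map List.tail) + 1 := by
          have h1 : rs.map List.length = (rs.map (fun l => l.length - 1)).map (· + 1) := by
            rw [List.map_map]
            refine List.map_congr_left fun l hl => ?_
            have hl1 : 1 ≤ l.length := List.length_pos_iff.mpr (hne l hl)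
            simp only [Function.comp]
            omega
          have h2 : (rs.map List.tail).map List.length = rs.map (fun l => l.length - 1) := by
            rw [List.map_map]
            refine List.map_congr_left fun l _ => ?_
            simp [List.length_tail]
          simp only [mLen, h1, h2, List.length_cons]
          exact fmin_succ _ _
        rw [show pyZipStarAux (x :: xs) rs
              = (x :: rs.map (fun l => l.headD 0)) :: pyZipStarAux xs (rs.map List.tail) from by
            rw [pyZipStarAux]; simp [hall]]
        rw [ih, key1, List.range_succ_eq_map, List.map_cons, List.map_map]
        congr 1
        · simp only [List.getD_cons_zero]
          congr 1
          refine List.map_congr_left fun l _ => ?_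
          cases l <;> rfl
        · refine List.map_congr_left fun j hj => ?_
          simp only [Function.comp, List.getD_cons_succ]
          congr 1
          rw [List.map_map]
          refine List.map_congr_left fun l hl => ?_
          cases l with
          | nil => exact absurd rfl (hne _ hl)
          | cons y t => rfl
      · rcases List.all_eq_false.mp (Bool.eq_false_iff.mpr hall) with ⟨l, hl, hemp⟩
        have hlen : l.length = 0 := by
          cases l with
          | nil => rfl
          | cons y t => simp at hemp
        have hmem := fmin_le_mem (rs.map List.length) (x :: xs).length
          (List.mem_map_of_mem (f := List.length) hl)
        have h0 : mLen (x :: xs) rs = 0 := by unfold mLen; omega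
        rw [h0, show pyZipStarAux (x :: xs) rs = [] from by rw [pyZipStarAux]; simp [hall]]
        rfl

-- the row-expansion helper: flatten of constant-size replicates
theorem rep_length (n : Nat) (r : List Int) :
    ((r.map (fun i => List.replicate n i)).flatten).length = r.length * n := by
  induction r with
  | nil => simp
  | cons y ys ih =>
      simp only [List.map_cons, List.flatten_cons, List.length_append, List.length_replicate,
        List.length_cons, ih]
      ring

theorem rep_getD (n : Nat) (r : List Int) (j : Nat) (h : j < r.length * n) :
    ((r.map (fun i => List.replicate n i)).flatten).getD j 0 = r.getD (j / n) 0 := by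
  induction r generalizing j with
  | nil => simp at h
  | cons y ys ih =>
      have hn : 0 < n := by
        rcases Nat.eq_zero_or_pos n with h0 | h0
        · subst h0; simp at h
        · exact h0
      simp only [List.map_cons, List.flatten_cons]
      by_cases hj : j < n
      · rw [List.getD_append _ _ _ _ (by simpa using hj)]
        rw [Nat.div_eq_of_lt hj, List.getD_cons_zero]
        simp [List.getD_eq_getElem?_getD, List.getElem?_replicate, hj]
      · push_neg at hj
        rw [List.getD_append_right _ _ _ _ (by simpa using hj)]
        simp only [List.length_replicate]
        have hb : j - n < ys.length * n := by
          have : j < ys.length * n + n := by simpa [Nat.succ_mul] using h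
          omega
        rw [ih (j - n) hb, Nat.div_eq_sub_div hn hj, List.getD_cons_succ]

theorem foldl_append_flatten (ls : List (List Int)) (acc : List Int) :
    ls.foldl (· ++ ·) acc = acc ++ ls.flatten := by
  induction ls generalizing acc with
  | nil => simp
  | cons x t ih => simp [ih, List.append_assoc]

theorem zip_self_map {α β : Type} (l : List α) (f : α → β) :
    l.zip (l.map f) = l.map (fun a => (a, f a)) := by
  induction l with
  | nil => rfl
  | cons x t ih => simp [ih]

theorem min?_toNat (v0 : Int) (vrest : List Int) (m : Int)
    (h : PySem.List.min? (v0 :: vrest) (fun x => x) = some m) :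
    m.toNat = (vrest.map Int.toNat).foldl min v0.toNat := by
  have hmem := PySem.List.min?_mem h
  have hmin := PySem.List.min?_isMin h
  apply Nat.le_antisymm
  · rcases fmin_attained (vrest.map Int.toNat) v0.toNat with ha | ha
    · rw [ha]
      have : m ≤ v0 := hmin v0 List.mem_cons_self
      omega
    · rcases List.mem_map.mp ha with ⟨v, hv, hveq⟩
      rw [← hveq]
      have : m ≤ v := hmin v (List.mem_cons_of_mem v0 hv)
      omega
  · rcases List.mem_cons.mp hmem with hm | hm
    · subst hm; exact fmin_le_init _ _
    · exact fmin_le_mem _ _ (List.mem_map_of_mem (f := Int.toNat) hm)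

theorem li_toNat (len : Nat) (c : Int) : ((len : Int) * c).toNat = len * c.toNat := by
  by_cases hc : c ≤ 0
  · have h1 : (len : Int) * c ≤ 0 := mul_nonpos_iff.mpr (Or.inl ⟨by positivity, hc⟩)
    have h2 : c.toNat = 0 := by omega
    rw [h2, Nat.mul_zero]
    omega
  · push_neg at hc
    obtain ⟨k, hk⟩ : ∃ k : Nat, c = (k : Int) := ⟨c.toNat, by omega⟩
    subst hk
    rw [← Nat.cast_mul, Int.toNat_natCast, Int.toNat_natCast]

-- ===== VERDICT (by name: the statement is the Claim_ definition above) =====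

theorem broadcast_params_spec : Claim_equal_broadcast_params := by
  intro raw ng _hdom _hpre
  unfold Spec_broadcast_params
  cases raw with
  | nil =>
      simp [broadcast_params, broadcast_params_alt, pyZipStar, PySem.List.minD,
        PySem.List.min?, PySem.List.pyRange_zero]
  | cons r0 rest =>
      set rc : List Int → Int := fun r =>
        PySem.Int.floordiv ng (r.length : Int) +
          (if PySem.Int.mod ng (r.length : Int) = 0 then 0 else 1) with hrc
      -- A side: expanded rows, then the zip characterisation
      have hA : broadcast_params (r0 :: rest) ng
          = pyZipStarAux ((r0.map (fun i => List.replicate (rc r0).toNat i)).flatten)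
              (rest.map (fun p => (p.map (fun i => List.replicate (rc p).toNat i)).flatten)) := by
        simp only [broadcast_params, List.map_cons, foldl_append_flatten, List.nil_append, hrc]
        rfl
      have hzipA := zipAux_eq ((r0.map (fun i => List.replicate (rc r0).toNat i)).flatten)
        (rest.map (fun p => (p.map (fun i => List.replicate (rc p).toNat i)).flatten))
      set M := mLen ((r0.map (fun i => List.replicate (rc r0).toNat i)).flatten)
        (rest.map (fun p => (p.map (fun i => List.replicate (rc p).toNat i)).flatten)) with hM
      -- B side rewritten over rows instead of zipped pairs
      have hB : broadcast_params_alt (r0 :: rest) ng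
          = (PySem.List.pyRange 0 (PySem.List.minD
                ((r0 :: rest).map (fun r => ((r.length : Int) * rc r))) (fun x => x) 0) 1).map
              (fun j => (r0 :: rest).map
                (fun r => PySem.List.pyGetD r (PySem.Int.floordiv j (rc r)) 0)) := by
        simp only [broadcast_params_alt]
        rw [zip_self_map]
        simp only [List.map_map]
        rfl
      set vs : List Int := (r0 :: rest).map (fun r => ((r.length : Int) * rc r)) with hvs
      have hsome : PySem.List.min? vs (fun x => x) ≠ none := by
        intro hnone
        rw [PySem.List.min?_eq_none_iff] at hnone
        simp [hvs] at hnone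
      obtain ⟨m, hm⟩ := Option.ne_none_iff_exists'.mp hsome
      have hG : PySem.List.minD vs (fun x => x) 0 = m := by
        simp [PySem.List.minD, hm]
      have hmv : PySem.List.min? ((((r0.length : Int)) * rc r0) :: rest.map
          (fun r => ((r.length : Int) * rc r))) (fun x => x) = some m := by
        simpa [hvs] using hm
      have hmN : m.toNat = ((rest.map (fun r => ((r.length : Int) * rc r))).map Int.toNat).foldl
          min ((r0.length : Int) * rc r0).toNat := min?_toNat _ _ _ hmv
      have hMm : M = m.toNat := by
        have hl : (rest.map (fun p => (p.map (fun i => List.replicate (rc p).toNat i)).flatten)).map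
              List.length
            = (rest.map (fun r => ((r.length : Int) * rc r))).map Int.toNat := by
          rw [List.map_map, List.map_map]
          refine List.map_congr_left fun r _ => ?_
          simp only [Function.comp_apply]
          rw [rep_length, li_toNat]
        rw [hmN, hM]
        unfold mLen
        rw [hl, rep_length, li_toNat]
      have hbound : ∀ r ∈ r0 :: rest,
          M ≤ ((r.map (fun i => List.replicate (rc r).toNat i)).flatten).length := by
        intro r hr
        rcases List.mem_cons.mp hr with h | h
        · subst h; rw [hM]; unfold mLen; exact fmin_le_init _ _
        · rw [hM]; unfold mLen
          exact fmin_le_mem _ _ (List.mem_map_of_mem (f := List.length) (List.mem_map_of_mem h))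
      have hrange : PySem.List.pyRange 0 m 1 = (List.range m.toNat).map (fun k : Nat => ((k : Nat) : Int)) := by
        rw [PySem.List.pyRange_one]
        simp only [Int.sub_zero]
        exact List.map_congr_left fun k _ => by omega
      rw [hA, hzipA, hB, hG, hrange, List.map_map, ← hMm]
      refine List.map_congr_left fun j hj => ?_
      have hjM : j < M := List.mem_range.mp hj
      have hrow : ∀ r ∈ r0 :: rest,
          ((r.map (fun i => List.replicate (rc r).toNat i)).flatten).getD j 0
            = PySem.List.pyGetD r (PySem.Int.floordiv ((j : Nat) : Int) (rc r)) 0 := by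
        intro r hr
        have hb := hbound r hr
        rw [rep_length] at hb
        have hbj : j < r.length * (rc r).toNat := lt_of_lt_of_le hjM hb
        have hnn : 0 < (rc r).toNat := by
          rcases Nat.eq_zero_or_pos (rc r).toNat with h0 | h0
          · rw [h0, Nat.mul_zero] at hbj; omega
          · exact h0
        have hrc2 : rc r = (((rc r).toNat : Nat) : Int) := by omega
        rw [rep_getD _ _ _ hbj, hrc2, PySem.Int.floordiv_natCast, PySem.List.pyGetD_natCast,
          Int.toNat_natCast]
      simp only [Function.comp_apply, Function.comp, List.map_cons, List.map_map]
      congr 1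
      · exact hrow r0 List.mem_cons_self
      · refine List.map_congr_left fun r hr => ?_
        exact hrow r (List.mem_cons_of_mem r0 hr)
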